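-- pv_equiv track=rewrite | github.com/MozartofCode/Poker-Smart-Contract | Backend/game.py | is_two_pair
-- ===== SOURCE A (Python) =====
-- def is_two_pair(cards):
--     ranks = dict()
--
--     for card in cards:
--         rank = card.split(" of ")[0]
--
--         if rank in ranks:
--             ranks[rank] += 1
--         else:
--             ranks[rank] = 1
--
--     pair_num = 0
--
--     for rank in ranks.keys():
--         if ranks[rank] == 2:
--             pair_num += 1
--
--     return pair_num == 2
-- ===== SOURCE B (Python) =====
-- def is_two_pair(cards):
--     ranks = sorted(card.split(" of ")[0] for card in cards)
--     n = len(ranks)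
--     pairs = 0
--     i = 0
--     while i < n:
--         j = i + 1
--         while j < n and ranks[j] == ranks[i]:
--             j += 1
--         if j - i == 2:
--             pairs += 1
--         i = j
--     return pairs == 2
-- ===== Notes on version B (the rewrite author's own statement) =====
-- stated objective: alternative
-- what changed: Replaces A's frequency dictionary and second pass over its keys by sorting the extracted ranks and scanning the sorted list once, counting consecutive-equal runs of length exactly 2.
import Mathlib
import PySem

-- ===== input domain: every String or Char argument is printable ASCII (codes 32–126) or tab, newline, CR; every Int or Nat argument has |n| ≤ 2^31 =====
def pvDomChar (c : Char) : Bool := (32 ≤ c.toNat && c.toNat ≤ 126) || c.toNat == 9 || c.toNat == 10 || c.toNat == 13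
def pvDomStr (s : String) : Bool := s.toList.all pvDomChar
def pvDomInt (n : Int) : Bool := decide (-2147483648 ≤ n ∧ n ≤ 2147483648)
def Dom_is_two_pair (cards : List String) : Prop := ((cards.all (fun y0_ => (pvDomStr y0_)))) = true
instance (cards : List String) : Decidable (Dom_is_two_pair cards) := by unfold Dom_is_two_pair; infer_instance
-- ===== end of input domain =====

-- B replaces A's frequency dict + key pass by sort-then-run-scan over the ranks (alternative decomposition, same results).

-- ===== PORT A =====
-- dict counting loop, then a pass over the keys counting values equal to 2
def is_two_pair (cards : List String) : Bool :=
  let ranks : PySem.Dict String Int :=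
    cards.foldl (fun d card =>
      let rank := ((PySem.Str.split? card " of ").getD []).headD ""   -- split with non-empty sep is never empty, so [0] is the head
      if d.contains rank then d.insert rank (d.getD rank 0 + 1)  -- ranks[rank] += 1 (key present, so getD reads the stored value)
      else d.insert rank 1) PySem.Dict.empty
  let pair_num : Int :=
    ranks.keys.foldl (fun acc rank => if ranks.getD rank 0 == 2 then acc + 1 else acc) 0
  pair_num == 2

-- ===== PORT B =====
-- scan the sorted rank list run by run: run = length of the leading block of equal ranks
def runScan : List String → Nat
  | [] => 0
  | x :: rest =>
      let run := (rest.takeWhile (fun y => y == x)).length + 1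
      (if run == 2 then 1 else 0) + runScan (rest.dropWhile (fun y => y == x))
  termination_by l => l.length
  decreasing_by
    have := List.length_dropWhile_le (fun y => y == x) rest
    simp only [List.length_cons]; omega

def is_two_pair_alt (cards : List String) : Bool :=
  let ranks := PySem.List.sorted (cards.map (fun card => ((PySem.Str.split? card " of ").getD []).headD "")) (fun r => r) false
  runScan ranks == 2

-- ===== PRECONDITION & SPEC =====
def Spec_is_two_pair (cards : List String) (out : Bool) : Prop := out = is_two_pair_alt cards
instance (cards : List String) (out : Bool) : Decidable (Spec_is_two_pair cards out) := by unfold Spec_is_two_pair; infer_instance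

-- ===== CLAIM (what is proved, stated in full; the proofs are below) =====
def Claim_equal_is_two_pair : Prop := ∀ (cards : List String), Dom_is_two_pair cards → Spec_is_two_pair cards (is_two_pair cards)

-- ===== LEMMAS AND PROOFS =====

-- A's dict is Counter of the extracted ranks
theorem dictA_eq_counter (cards : List String) :
    cards.foldl (fun d card =>
      let rank := ((PySem.Str.split? card " of ").getD []).headD ""
      if d.contains rank then d.insert rank (d.getD rank 0 + 1)
      else d.insert rank 1) PySem.Dict.empty
    = PySem.Dict.counter (cards.map (fun card => ((PySem.Str.split? card " of ").getD []).headD "")) := by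
  rw [← PySem.Dict.foldl_insert_getD_add_one_eq_counter, List.foldl_map]
  apply PySem.List.foldl_congr_mem
  intro d card _
  cases hc : d.contains (((PySem.Str.split? card " of ").getD []).headD "") with
  | true => rw [if_pos hc]
  | false =>
      rw [if_neg (by simp only [hc]; exact Bool.false_ne_true),
        PySem.Dict.getD_of_not_contains _ _ hc]
      norm_num

-- in a ≤-sorted list, everything the run scan drops past the leading x-run is strictly above x
theorem lt_of_mem_dropWhile (l : List String) (x : String)
    (hp : l.Pairwise (fun a b => a ≤ b)) (hle : ∀ y ∈ l, x ≤ y) :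
    ∀ z ∈ l.dropWhile (fun y => y == x), x < z := by
  induction l with
  | nil => simp
  | cons a l' ih =>
      rw [List.pairwise_cons] at hp
      cases ha : (a == x) with
      | true =>
          rw [show (a :: l').dropWhile (fun y => y == x) = l'.dropWhile (fun y => y == x) from by simp [ha]]
          exact ih hp.2 (fun y hy => hle y (List.mem_cons_of_mem a hy))
      | false =>
          rw [show (a :: l').dropWhile (fun y => y == x) = a :: l' from by simp [ha]]
          intro z hz
          have hxa : x < a := lt_of_le_of_ne (hle a (List.mem_cons_self))
            (fun hxe => by simp [hxe.symm] at ha)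
          rcases List.mem_cons.mp hz with rfl | hz'
          · exact hxa
          · exact lt_of_lt_of_le hxa (hp.1 z hz')

-- the run scan of any ≤-sorted list counts the distinct values occurring exactly twice
theorem runScan_sorted (n : Nat) : ∀ l : List String, l.length ≤ n →
    l.Pairwise (fun a b => a ≤ b) →
    runScan l = (PySem.Set.ofList l).countP (fun k => l.count k == 2) := by
  induction n with
  | zero =>
      intro l hl _
      have : l = [] := List.eq_nil_of_length_eq_zero (by omega)
      subst this; simp [runScan]
  | succ n ih =>
      intro l hl hp
      match l with
      | [] => simp [runScan]
      | x :: rest =>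
        rw [List.pairwise_cons] at hp
        set t1 := rest.takeWhile (fun y => y == x) with ht1
        set t2 := rest.dropWhile (fun y => y == x) with ht2
        have hsplit : t1 ++ t2 = rest := List.takeWhile_append_dropWhile
        have ht1rep : t1 = List.replicate t1.length x :=
          List.eq_replicate_of_mem (fun y hy => eq_of_beq (List.mem_takeWhile_imp (p := fun y => y == x) hy))
        have hlt : ∀ z ∈ t2, x < z := lt_of_mem_dropWhile rest x hp.2 hp.1
        have hne : ∀ z ∈ t2, z ≠ x := fun z hz => ne_of_gt (hlt z hz)
        -- counts
        have hcx : (x :: rest).count x = t1.length + 1 := by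
          rw [List.count_cons, ← hsplit, List.count_append]
          have h2 : t2.count x = 0 := by
            rw [List.count_eq_zero]
            intro hmem; exact (hne x hmem) rfl
          rw [h2]
          conv_lhs => rw [ht1rep]
          simp
        have hck : ∀ k ∈ t2, (x :: rest).count k = t2.count k := by
          intro k hk
          have hkx : k ≠ x := hne k hk
          rw [List.count_cons, ← hsplit, List.count_append]
          conv_lhs => rw [ht1rep]
          simp [List.count_replicate, Ne.symm hkx]
        -- the distinct elements: ofList (x :: rest) is a permutation of x :: ofList t2
        have hperm : (PySem.Set.ofList (x :: rest)).Perm (x :: PySem.Set.ofList t2) := by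
          rw [List.perm_ext_iff_of_nodup (PySem.Set.nodup_ofList _)]
          · intro a
            rw [PySem.Set.mem_ofList, List.mem_cons, List.mem_cons, PySem.Set.mem_ofList,
              ← hsplit, List.mem_append]
            constructor
            · rintro (rfl | h1 | h2)
              · exact Or.inl rfl
              · exact Or.inl (eq_of_beq (List.mem_takeWhile_imp (p := fun y => y == x) h1))
              · exact Or.inr h2
            · rintro (rfl | h2)
              · exact Or.inl rfl
              · exact Or.inr (Or.inr h2)
          · refine List.nodup_cons.mpr ⟨?_, PySem.Set.nodup_ofList _⟩
            rw [PySem.Set.mem_ofList]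
            intro hmem; exact (hne x hmem) rfl
        -- unfold one step of the scan
        have hrs : runScan (x :: rest) =
            (if t1.length + 1 == 2 then 1 else 0) + runScan t2 := by
          rw [runScan]
        have hlen2 : t2.length ≤ n := by
          have h1 : t2.length ≤ rest.length := List.length_dropWhile_le _ _
          have h2 : (x :: rest).length = rest.length + 1 := List.length_cons
          omega
        have hpt2 : t2.Pairwise (fun a b => a ≤ b) :=
          hp.2.sublist (List.dropWhile_sublist _)
        rw [hrs, ih t2 hlen2 hpt2, hperm.countP_eq, List.countP_cons]
        have hpx : ((x :: rest).count x == 2) = (t1.length + 1 == 2) := by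
          rw [hcx]
        have hcongr : (PySem.Set.ofList t2).countP (fun k => (x :: rest).count k == 2)
            = (PySem.Set.ofList t2).countP (fun k => t2.count k == 2) := by
          apply List.countP_congr
          intro k hk
          rw [hck k ((PySem.Set.mem_ofList _ _).mp hk)]
        rw [hcongr, hpx]
        omega

theorem main_eq (cards : List String) : is_two_pair cards = is_two_pair_alt cards := by
  show (let ranks : PySem.Dict String Int :=
      cards.foldl (fun d card =>
        let rank := ((PySem.Str.split? card " of ").getD []).headD ""
        if d.contains rank then d.insert rank (d.getD rank 0 + 1)
        else d.insert rank 1) PySem.Dict.empty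
    let pair_num : Int :=
      ranks.keys.foldl (fun acc rank => if ranks.getD rank 0 == 2 then acc + 1 else acc) 0
    (pair_num == 2))
    = (let ranks := PySem.List.sorted
        (cards.map (fun card => ((PySem.Str.split? card " of ").getD []).headD "")) (fun r => r) false
      (runScan ranks == 2))
  simp only []
  set r := cards.map (fun card => ((PySem.Str.split? card " of ").getD []).headD "") with hr
  set s := PySem.List.sorted r (fun k => k) false with hs
  have hperm : s.Perm r := PySem.List.sorted_perm _ _ _
  -- A's side: the dict is Counter r; the key pass counts distinct ranks of multiplicity 2
  rw [dictA_eq_counter, ← hr, PySem.Dict.keys_counter,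
    PySem.List.foldl_if_add_one (fun k => ((PySem.Dict.counter r).getD k 0 == 2))]
  have hA : (PySem.Set.ofList r).countP (fun k => (PySem.Dict.counter r).getD k 0 == 2)
      = (PySem.Set.ofList r).countP (fun k => ((r.count k : Int) == 2)) := by
    apply List.countP_congr
    intro k _
    rw [PySem.Dict.getD_counter]
  -- B's side: the run scan of the sorted ranks counts the same set
  have hB : runScan s = (PySem.Set.ofList r).countP (fun k => r.count k == 2) := by
    rw [runScan_sorted s.length s le_rfl
      (by simpa using PySem.List.sorted_pairwise r (fun k => k))]
    have hofs : (PySem.Set.ofList s).Perm (PySem.Set.ofList r) := by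
      rw [List.perm_ext_iff_of_nodup (PySem.Set.nodup_ofList _) (PySem.Set.nodup_ofList _)]
      intro a
      rw [PySem.Set.mem_ofList, PySem.Set.mem_ofList]
      exact hperm.mem_iff
    rw [hofs.countP_eq]
    apply List.countP_congr
    intro k _
    rw [hperm.count_eq]
  rw [hA, hB]
  have hcast : ∀ m : Nat, ((0 : Int) + (m : Int) == 2) = (m == 2) := by
    intro m
    by_cases h : m = 2
    · subst h; rfl
    · simp [h, show ((m:Int)) ≠ 2 from by omega]
  have hnat : ∀ m : Nat, ((m : Int) == 2) = (m == 2) := by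
    intro m
    by_cases h : m = 2
    · subst h; rfl
    · simp [h, show ((m:Int)) ≠ 2 from by omega]
  simp only [hnat]
  rw [hcast]

-- ===== VERDICT (by name: the statement is the Claim_ definition above) =====
theorem is_two_pair_spec : Claim_equal_is_two_pair := by
  intro cards _
  exact main_eq cards
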